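-- pv_equiv track=rewrite | github.com/abalon1210/CAMP---Context-Aware-Mining-Patterns-for-Interaction-Failures | cafca_colab.py | TemporalJoin
-- ===== SOURCE A (Python) =====
-- def TemporalJoin(element_a, element_b): # temporal join two sequence atoms' id lists
--   resultList = {} # key: new sequence atom (combining element_a & element_b), value: list of (seqid, time)
--
--   for event_a in element_a[1]:
--     for event_b in element_b[1]:
--       if event_a[0] == event_b[0]: # seqid
--         if event_a[1] < event_b[1]: # time
--           newSeq = tuple(element_a[0]+[element_b[0][-1]])
--           if newSeq not in resultList:
--             resultList[newSeq] = set()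
--           resultList[newSeq].add(event_b)
--         elif event_a[1] > event_b[1]: # time
--           newSeq = tuple(element_b[0]+[element_a[0][-1]])
--           if newSeq not in resultList:
--             resultList[newSeq] = set()
--           resultList[newSeq].add(event_a)
--         elif element_a[0][-1] != element_b[0][-1]:
--           newSeq_1 = tuple(element_a[0][:-1] + sorted([element_a[0][-1],element_b[0][-1]]))
--           if newSeq_1 not in resultList:
--             resultList[newSeq_1] = set()
--           resultList[newSeq_1].add(event_b)
--           newSeq_2 = tuple(element_b[0][:-1] + sorted([element_a[0][-1],element_b[0][-1]]))
--           if newSeq_1 != newSeq_2: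
--             if newSeq_2 not in resultList:
--               resultList[newSeq_2] = set()
--             resultList[newSeq_2].add(event_b)
--   return resultList
-- ===== SOURCE B (Python) =====
-- def TemporalJoin(element_a, element_b): # hash join: bucket element_b by seqid, probe one bucket per event_a
--   resultList = {}
--   buckets = {}
--   for ev in element_b[1]:
--     buckets.setdefault(ev[0], []).append(ev)
--   for event_a in element_a[1]:
--     for event_b in buckets.get(event_a[0], ()):
--       if event_a[1] < event_b[1]:
--         resultList.setdefault(tuple(element_a[0] + [element_b[0][-1]]), set()).add(event_b)
--       elif event_a[1] > event_b[1]: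
--         resultList.setdefault(tuple(element_b[0] + [element_a[0][-1]]), set()).add(event_a)
--       elif element_a[0][-1] != element_b[0][-1]:
--         merged = sorted([element_a[0][-1], element_b[0][-1]])
--         k1 = tuple(element_a[0][:-1] + merged)
--         k2 = tuple(element_b[0][:-1] + merged)
--         resultList.setdefault(k1, set()).add(event_b)
--         if k1 != k2:
--           resultList.setdefault(k2, set()).add(event_b)
--   return resultList
-- ===== Notes on version B (the rewrite author's own statement) =====
-- stated objective: alternative
-- what changed: Replaced A's nested scan over every (event_a, event_b) pair by a hash join: element_b's events are grouped once into a dict keyed by seqid and each event_a probes only its own bucket; the per-key update uses dict.setdefault instead of A's membership-test-then-insert.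
import Mathlib
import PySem

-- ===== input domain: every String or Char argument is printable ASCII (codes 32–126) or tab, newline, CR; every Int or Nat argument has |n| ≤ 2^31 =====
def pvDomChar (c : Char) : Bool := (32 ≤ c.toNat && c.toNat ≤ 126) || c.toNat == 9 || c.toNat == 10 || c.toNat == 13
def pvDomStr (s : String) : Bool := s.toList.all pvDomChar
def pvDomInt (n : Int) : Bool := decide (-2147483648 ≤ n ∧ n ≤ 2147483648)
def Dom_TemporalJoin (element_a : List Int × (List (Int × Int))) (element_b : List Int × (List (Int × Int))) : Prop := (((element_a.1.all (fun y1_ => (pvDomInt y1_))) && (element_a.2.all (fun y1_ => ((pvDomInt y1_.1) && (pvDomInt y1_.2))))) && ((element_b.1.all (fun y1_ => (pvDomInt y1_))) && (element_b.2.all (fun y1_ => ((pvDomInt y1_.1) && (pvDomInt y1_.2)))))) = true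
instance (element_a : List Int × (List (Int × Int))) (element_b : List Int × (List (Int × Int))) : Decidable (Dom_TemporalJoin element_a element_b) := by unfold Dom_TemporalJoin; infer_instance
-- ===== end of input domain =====

-- ===== PORT A =====
-- Faithful transliteration of A's nested O(|A|*|B|) scan; the dict of sets is a
-- PySem.Dict (List Int) (PySem.Set (Int × Int)), returned as its items list.
def TemporalJoin (element_a : List Int × (List (Int × Int))) (element_b : List Int × (List (Int × Int))) : List (List Int × List (Int × Int)) :=
  let resultList : PySem.Dict (List Int) (PySem.Set (Int × Int)) := PySem.Dict.empty
  let resultList := element_a.2.foldl (fun resultList event_a =>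
    element_b.2.foldl (fun resultList event_b =>
      if event_a.1 == event_b.1 then -- seqid
        if event_a.2 < event_b.2 then -- time
          let newSeq := element_a.1 ++ [PySem.List.pyGetD element_b.1 (-1) 0]
          let resultList := if resultList.contains newSeq then resultList else resultList.insert newSeq PySem.Set.empty
          resultList.modify newSeq PySem.Set.empty (fun s => s.add event_b)
        else if event_a.2 > event_b.2 then -- time
          let newSeq := element_b.1 ++ [PySem.List.pyGetD element_a.1 (-1) 0]
          let resultList := if resultList.contains newSeq then resultList else resultList.insert newSeq PySem.Set.empty
          resultList.modify newSeq PySem.Set.empty (fun s => s.add event_a)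
        else if PySem.List.pyGetD element_a.1 (-1) 0 != PySem.List.pyGetD element_b.1 (-1) 0 then
          let newSeq_1 := PySem.List.slice element_a.1 none (some (-1)) ++ PySem.List.sorted [PySem.List.pyGetD element_a.1 (-1) 0, PySem.List.pyGetD element_b.1 (-1) 0] (fun x => x) false
          let resultList := if resultList.contains newSeq_1 then resultList else resultList.insert newSeq_1 PySem.Set.empty
          let resultList := resultList.modify newSeq_1 PySem.Set.empty (fun s => s.add event_b)
          let newSeq_2 := PySem.List.slice element_b.1 none (some (-1)) ++ PySem.List.sorted [PySem.List.pyGetD element_a.1 (-1) 0, PySem.List.pyGetD element_b.1 (-1) 0] (fun x => x) false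
          if newSeq_1 != newSeq_2 then
            let resultList := if resultList.contains newSeq_2 then resultList else resultList.insert newSeq_2 PySem.Set.empty
            resultList.modify newSeq_2 PySem.Set.empty (fun s => s.add event_b)
          else resultList
        else resultList
      else resultList) resultList) resultList
  resultList.items

-- ===== PORT B =====
-- B (hash join): bucket element_b's events by seqid once, probe one bucket per event_a;
-- per-key update is Python's resultList.setdefault(key, set()).add(ev), i.e. Dict.modify.
def TemporalJoin_alt (element_a : List Int × (List (Int × Int))) (element_b : List Int × (List (Int × Int))) : List (List Int × List (Int × Int)) :=
  let buckets : PySem.Dict Int (List (Int × Int)) :=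
    element_b.2.foldl (fun d ev => d.modify ev.1 [] (fun t => t ++ [ev])) PySem.Dict.empty
  let resultList := element_a.2.foldl (fun resultList event_a =>
    (buckets.getD event_a.1 []).foldl (fun resultList event_b =>
      if event_a.2 < event_b.2 then
        resultList.modify (element_a.1 ++ [PySem.List.pyGetD element_b.1 (-1) 0]) PySem.Set.empty (fun s => s.add event_b)
      else if event_a.2 > event_b.2 then
        resultList.modify (element_b.1 ++ [PySem.List.pyGetD element_a.1 (-1) 0]) PySem.Set.empty (fun s => s.add event_a)
      else if PySem.List.pyGetD element_a.1 (-1) 0 != PySem.List.pyGetD element_b.1 (-1) 0 then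
        let merged := PySem.List.sorted [PySem.List.pyGetD element_a.1 (-1) 0, PySem.List.pyGetD element_b.1 (-1) 0] (fun x => x) false
        let k1 := PySem.List.slice element_a.1 none (some (-1)) ++ merged
        let k2 := PySem.List.slice element_b.1 none (some (-1)) ++ merged
        let resultList := resultList.modify k1 PySem.Set.empty (fun s => s.add event_b)
        if k1 != k2 then resultList.modify k2 PySem.Set.empty (fun s => s.add event_b) else resultList
      else resultList) resultList) (PySem.Dict.empty : PySem.Dict (List Int) (PySem.Set (Int × Int)))
  resultList.items

-- ===== PRECONDITION & SPEC =====
-- Pre_ excludes exactly the inputs on which A raises IndexError: an id list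
-- (element[0]) whose last element ([-1]) is demanded by some seqid-matching event
-- pair while that id list is empty (which branch reads which [-1] depends on the
-- time comparison).
def Pre_TemporalJoin (element_a : List Int × (List (Int × Int))) (element_b : List Int × (List (Int × Int))) : Prop :=
  ∀ p ∈ element_a.2, ∀ q ∈ element_b.2, p.1 = q.1 →
    (p.2 < q.2 → element_b.1 ≠ []) ∧ (q.2 < p.2 → element_a.1 ≠ []) ∧
    (p.2 = q.2 → element_a.1 ≠ [] ∧ element_b.1 ≠ [])
instance (element_a : List Int × (List (Int × Int))) (element_b : List Int × (List (Int × Int))) : Decidable (Pre_TemporalJoin element_a element_b) := by unfold Pre_TemporalJoin; infer_instance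
def pvWitness_TemporalJoin : (List Int × (List (Int × Int))) × (List Int × (List (Int × Int))) :=
  (([1], [(1, 2), (2, 5)]), ([2], [(1, 3), (2, 5)]))
def Spec_TemporalJoin (element_a : List Int × (List (Int × Int))) (element_b : List Int × (List (Int × Int))) (out : List (List Int × List (Int × Int))) : Prop := out = TemporalJoin_alt element_a element_b
instance (element_a : List Int × (List (Int × Int))) (element_b : List Int × (List (Int × Int))) (out : List (List Int × List (Int × Int))) : Decidable (Spec_TemporalJoin element_a element_b out) := by unfold Spec_TemporalJoin; infer_instance

-- ===== CLAIM (what is proved, stated in full; the proofs are below) =====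
def Claim_equal_TemporalJoin : Prop := ∀ (element_a : List Int × (List (Int × Int))) (element_b : List Int × (List (Int × Int))), Dom_TemporalJoin element_a element_b → Pre_TemporalJoin element_a element_b → Spec_TemporalJoin element_a element_b (TemporalJoin element_a element_b)

-- ===== LEMMAS AND PROOFS =====

-- A's "if key not in d: d[key] = set()" followed by "d[key].add(ev)" is exactly B's
-- "d.setdefault(key, set()).add(ev)", i.e. a single Dict.modify.
theorem tj_add_eq (d : PySem.Dict (List Int) (PySem.Set (Int × Int))) (k : List Int)
    (f : PySem.Set (Int × Int) → PySem.Set (Int × Int)) :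
    (if d.contains k then d else d.insert k PySem.Set.empty).modify k PySem.Set.empty f
      = d.modify k PySem.Set.empty f := by
  by_cases h : d.contains k = true
  · rw [if_pos h]
  · rw [Bool.not_eq_true] at h
    simp only [h, Bool.false_eq_true, if_false, PySem.Dict.modify,
      PySem.Dict.getD_insert_self, PySem.Dict.insert_insert_self,
      PySem.Dict.getD_of_not_contains d PySem.Set.empty h]

-- The bucket built by B's grouping pass holds, per seqid, exactly the filter of
-- element_b's events with that seqid, in order.
theorem tj_bucket_getD (l : List (Int × Int)) (c : Int) :
    (l.foldl (fun d ev => d.modify ev.1 [] (fun t => t ++ [ev]))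
        (PySem.Dict.empty : PySem.Dict Int (List (Int × Int)))).getD c []
      = l.filter (fun ev => ev.1 == c) := by
  have h := PySem.Dict.getD_foldl_modify_append (l := l.map (fun ev => (ev.1, ev)))
      (d := (PySem.Dict.empty : PySem.Dict Int (List (Int × Int)))) (c := c)
  simpa [List.foldl_map, List.filter_map, List.map_map, Function.comp_def] using h

-- ===== VERDICT (by name: the statement is the Claim_ definition above) =====
theorem TemporalJoin_spec : Claim_equal_TemporalJoin := by
  intro element_a element_b _ _
  unfold Spec_TemporalJoin TemporalJoin TemporalJoin_alt
  dsimp only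
  congr 1
  congr 1
  funext res event_a
  rw [tj_bucket_getD]
  have hf : element_b.2.filter (fun ev => ev.1 == event_a.1)
      = element_b.2.filter (fun ev => event_a.1 == ev.1) := by
    simp [Bool.beq_comm]
  rw [hf, List.foldl_filter]
  congr 1
  funext acc event_b
  by_cases hm : (event_a.1 == event_b.1) = true
  · rw [if_pos hm]
    rw [if_pos hm]
    simp only [tj_add_eq]
  · simp [hm]
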